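-- pv_equiv track=rewrite | github.com/scikit-learn/scikit-learn | venv/lib/python3.5/site-packages/autopep8.py | token_offsets
-- ===== SOURCE A (Python) =====
-- def token_offsets(tokens):
--     """Yield tokens and offsets."""
--     end_offset = 0
--     previous_end_row = 0
--     previous_end_column = 0
--     for t in tokens:
--         token_type = t[0]
--         token_string = t[1]
--         (start_row, start_column) = t[2]
--         (end_row, end_column) = t[3]
--
--         # Account for the whitespace between tokens.
--         end_offset += start_column
--         if previous_end_row == start_row:
--             end_offset -= previous_end_column
--
--         # Record the start offset of the token.
--         start_offset = end_offset
--
--         # Account for the length of the token itself.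
--         end_offset += len(token_string)
--
--         yield (token_type,
--                token_string,
--                start_offset,
--                end_offset)
--
--         previous_end_row = end_row
--         previous_end_column = end_column
-- ===== SOURCE B (Python) =====
-- from itertools import accumulate
--
--
-- def token_offsets(tokens):
--     """Yield tokens and offsets."""
--     # Previous end positions: (0, 0) seed, then each token's end position.
--     prev_ends = [(0, 0)] + [t[3] for t in tokens[:-1]]
--     # Per-token increment: whitespace gap + token length.
--     increments = [
--         len(t[1]) + t[2][1] - (pe[1] if pe[0] == t[2][0] else 0)
--         for pe, t in zip(prev_ends, tokens)
--     ]
--     for t, end_offset in zip(tokens, accumulate(increments)):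
--         yield (t[0], t[1], end_offset - len(t[1]), end_offset)
-- ===== Notes on version B (the rewrite author's own statement) =====
-- stated objective: alternative
-- what changed: Replaces the single mutable end_offset/previous-position accumulator loop by a two-pass table construction: a list of per-token increments (token length plus whitespace gap against the previous token's recorded end) followed by itertools.accumulate prefix sums, from which each start offset is derived as end minus token length.
import Mathlib
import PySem

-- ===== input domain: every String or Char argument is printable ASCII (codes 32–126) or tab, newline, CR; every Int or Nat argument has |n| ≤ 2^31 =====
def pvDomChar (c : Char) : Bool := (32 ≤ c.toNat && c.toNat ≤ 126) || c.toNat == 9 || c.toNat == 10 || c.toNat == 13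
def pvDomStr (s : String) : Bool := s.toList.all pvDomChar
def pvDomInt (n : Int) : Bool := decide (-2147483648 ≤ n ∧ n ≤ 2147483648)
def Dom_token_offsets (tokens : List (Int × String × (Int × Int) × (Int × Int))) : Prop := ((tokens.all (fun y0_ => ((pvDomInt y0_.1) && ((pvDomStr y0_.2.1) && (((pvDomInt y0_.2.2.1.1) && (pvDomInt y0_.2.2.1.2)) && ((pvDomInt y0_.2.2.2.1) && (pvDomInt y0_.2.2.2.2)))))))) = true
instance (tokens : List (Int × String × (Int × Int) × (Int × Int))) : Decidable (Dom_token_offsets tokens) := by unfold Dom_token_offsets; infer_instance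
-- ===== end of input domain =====

-- B changes the decomposition only (an explicit increment table + prefix sums instead of one mutable accumulator); same O(n) cost.
-- A is a Python generator; both versions are compared as the list of yielded tuples.

-- ===== PORT A =====
-- single pass with mutable end_offset / previous_end_row / previous_end_column, appending each yielded tuple
def token_offsets (tokens : List (Int × String × (Int × Int) × (Int × Int))) : List (Int × String × Int × Int) :=
  (tokens.foldl
    (fun (st : Int × Int × Int × List (Int × String × Int × Int)) t =>
      let endOff := st.1
      let prevRow := st.2.1
      let prevCol := st.2.2.1
      let out := st.2.2.2
      -- end_offset += start_column; if previous_end_row == start_row: end_offset -= previous_end_column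
      let e1 := endOff + t.2.2.1.2
      let e2 := if prevRow == t.2.2.1.1 then e1 - prevCol else e1
      let startOff := e2
      let e3 := e2 + PySem.Str.len t.2.1
      (e3, t.2.2.2.1, t.2.2.2.2, out ++ [(t.1, t.2.1, startOff, e3)]))
    (0, 0, 0, [])).2.2.2

-- ===== PORT B =====
-- itertools.accumulate over the increment list, seeded at 0
def pyAccumulate : List Int → Int → List Int
  | [], _ => []
  | x :: xs, s => (s + x) :: pyAccumulate xs (s + x)

def token_offsets_alt (tokens : List (Int × String × (Int × Int) × (Int × Int))) : List (Int × String × Int × Int) :=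
  -- prev_ends = [(0,0)] + [t[3] for t in tokens[:-1]]
  let prevEnds : List (Int × Int) := ((0 : Int), (0 : Int)) :: tokens.dropLast.map (fun t => t.2.2.2)
  -- increments = [len(t[1]) + t[2][1] - (pe[1] if pe[0] == t[2][0] else 0) for pe, t in zip(prev_ends, tokens)]
  let incs : List Int := List.zipWith
    (fun (pe : Int × Int) t =>
      PySem.Str.len t.2.1 + t.2.2.1.2 - (if pe.1 == t.2.2.1.1 then pe.2 else 0))
    prevEnds tokens
  -- yield (t[0], t[1], end-len, end) for t, end in zip(tokens, accumulate(increments))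
  List.zipWith (fun t (e : Int) => (t.1, t.2.1, e - PySem.Str.len t.2.1, e))
    tokens (pyAccumulate incs 0)

-- ===== PRECONDITION & SPEC =====
def Spec_token_offsets (tokens : List (Int × String × (Int × Int) × (Int × Int))) (out : List (Int × String × Int × Int)) : Prop := out = token_offsets_alt tokens
instance (tokens : List (Int × String × (Int × Int) × (Int × Int))) (out : List (Int × String × Int × Int)) : Decidable (Spec_token_offsets tokens out) := by unfold Spec_token_offsets; infer_instance

-- ===== CLAIM (what is proved, stated in full; the proofs are below) =====
def Claim_equal_token_offsets : Prop := ∀ (tokens : List (Int × String × (Int × Int) × (Int × Int))), Dom_token_offsets tokens → Spec_token_offsets tokens (token_offsets tokens)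

-- ===== LEMMAS AND PROOFS =====

-- common recursive characterisation: process the token list with explicit previous end-position and offset
def goSpec : Int × Int → Int → List (Int × String × (Int × Int) × (Int × Int)) → List (Int × String × Int × Int)
  | _, _, [] => []
  | p, e, t :: ts =>
    let s := e + t.2.2.1.2 - (if p.1 == t.2.2.1.1 then p.2 else 0)
    let e' := s + PySem.Str.len t.2.1
    (t.1, t.2.1, s, e') :: goSpec t.2.2.2 e' ts

theorem foldA_eq (ts : List (Int × String × (Int × Int) × (Int × Int)))
    (e pr pc : Int) (acc : List (Int × String × Int × Int)) :
    (ts.foldl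
      (fun (st : Int × Int × Int × List (Int × String × Int × Int)) t =>
        let endOff := st.1
        let prevRow := st.2.1
        let prevCol := st.2.2.1
        let out := st.2.2.2
        let e1 := endOff + t.2.2.1.2
        let e2 := if prevRow == t.2.2.1.1 then e1 - prevCol else e1
        let startOff := e2
        let e3 := e2 + PySem.Str.len t.2.1
        (e3, t.2.2.2.1, t.2.2.2.2, out ++ [(t.1, t.2.1, startOff, e3)]))
      (e, pr, pc, acc)).2.2.2 = acc ++ goSpec (pr, pc) e ts := by
  induction ts generalizing e pr pc acc with
  | nil => simp [goSpec]
  | cons t ts ih =>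
    simp only [List.foldl_cons]
    rw [ih]
    have hs : (if (pr == t.2.2.1.1) = true then e + t.2.2.1.2 - pc else e + t.2.2.1.2)
        = e + t.2.2.1.2 - (if (pr == t.2.2.1.1) = true then pc else 0) := by split <;> omega
    simp only [goSpec, hs, List.append_assoc, List.singleton_append]

-- zipWith truncates to the shorter list, so the dropLast on the previous-ends column is invisible
theorem zipWith_cons_dropLast {T U : Type} (f : (Int × Int) → T → U) (g : T → Int × Int) :
    ∀ (l : List T) (p : Int × Int),
      List.zipWith f (p :: l.dropLast.map g) l = List.zipWith f (p :: l.map g) l := by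
  intro l
  induction l with
  | nil => intro p; rfl
  | cons t ts ih =>
    intro p
    cases ts with
    | nil => rfl
    | cons u us =>
      have hdl : (t :: u :: us).dropLast = t :: (u :: us).dropLast := rfl
      rw [hdl]
      have h := ih (g t)
      simp only [List.map_cons, List.zipWith_cons_cons] at h ⊢
      have h2 := (List.cons.injEq _ _ _ _).mp h
      rw [h2.2]

theorem altGo_eq (ts : List (Int × String × (Int × Int) × (Int × Int))) (p : Int × Int) (e : Int) :
    List.zipWith (fun t (x : Int) => (t.1, t.2.1, x - PySem.Str.len t.2.1, x))
      ts (pyAccumulate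
        (List.zipWith
          (fun (pe : Int × Int) t =>
            PySem.Str.len t.2.1 + t.2.2.1.2 - (if pe.1 == t.2.2.1.1 then pe.2 else 0))
          (p :: ts.map (fun t => t.2.2.2)) ts) e)
      = goSpec p e ts := by
  induction ts generalizing p e with
  | nil => rfl
  | cons t ts ih =>
    simp only [List.map_cons, List.zipWith_cons_cons]
    rw [pyAccumulate]
    simp only [List.zipWith_cons_cons, goSpec]
    rw [show e + (PySem.Str.len t.2.1 + t.2.2.1.2 - (if p.1 == t.2.2.1.1 then p.2 else 0))
          = (e + t.2.2.1.2 - (if p.1 == t.2.2.1.1 then p.2 else 0)) + PySem.Str.len t.2.1 by ring]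
    rw [ih]
    congr 2
    ring_nf

theorem alt_eq (tokens : List (Int × String × (Int × Int) × (Int × Int))) :
    token_offsets_alt tokens = goSpec (0, 0) 0 tokens := by
  show List.zipWith (fun t (e : Int) => (t.1, t.2.1, e - PySem.Str.len t.2.1, e)) tokens
      (pyAccumulate
        (List.zipWith
          (fun (pe : Int × Int) t =>
            PySem.Str.len t.2.1 + t.2.2.1.2 - (if pe.1 == t.2.2.1.1 then pe.2 else 0))
          (((0 : Int), (0 : Int)) :: tokens.dropLast.map (fun t => t.2.2.2)) tokens) 0)
      = goSpec (0, 0) 0 tokens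
  rw [zipWith_cons_dropLast, altGo_eq]

-- ===== VERDICT (by name: the statement is the Claim_ definition above) =====
theorem token_offsets_spec : Claim_equal_token_offsets := by
  intro tokens _
  unfold Spec_token_offsets token_offsets
  rw [foldA_eq, alt_eq]
  simp
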